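-- pv_equiv track=rewrite | github.com/EgorDudyrev/FCApy | fcapy/poset/poset.py | _transpose_hierarchy
-- ===== SOURCE A (Python) =====
-- from typing import List, Dict, Tuple, Callable, Any, FrozenSet, Optional, Collection, Set
--
-- def _transpose_hierarchy(hierarchy_dict: Dict[int, Collection[int]]) -> Dict[int, FrozenSet[int]]:
--     """Return transposed hierarchy of elements (i.e. turn ancestors into descendants and vice versa)
--
--     Parameters
--     ----------
--     hierarchy_dict: `dict` of type {`int`: `list` of `int`}
--         Ancestors or descendants of POSet
--
--     Returns
--     -------
--     new_dict: `dict` of type {`int`: `FrozenSet` of `int`}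
--         Ancestors if descendants are given, descendants if ancestors are given
--     """
--     new_dict = {}
--     for k, vs in hierarchy_dict.items():
--         if k not in new_dict:
--             new_dict[k] = set()
--         for v in vs:
--             new_dict[v] = new_dict.get(v, set()) | {k}
--     new_dict = {k: frozenset(vs) for k, vs in new_dict.items()}
--     return new_dict
-- ===== SOURCE B (Python) =====
-- def _transpose_hierarchy(hierarchy_dict):
--     """Gather formulation: for each node, collect the keys whose value list contains it."""
--     nodes = dict.fromkeys(x for k, vs in hierarchy_dict.items() for x in (k, *vs))
--     return {n: frozenset(k for k, vs in hierarchy_dict.items() if n in vs)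
--             for n in nodes}
-- ===== Notes on version B (the rewrite author's own statement) =====
-- stated objective: simpler
-- what changed: A scatters in one pass, pushing each key into every value's bucket inside a growing dict of sets; B first dedups the node stream (keys then values, first occurrence) and then gathers, scanning the whole item list once per node for incoming edges.
import Mathlib
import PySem

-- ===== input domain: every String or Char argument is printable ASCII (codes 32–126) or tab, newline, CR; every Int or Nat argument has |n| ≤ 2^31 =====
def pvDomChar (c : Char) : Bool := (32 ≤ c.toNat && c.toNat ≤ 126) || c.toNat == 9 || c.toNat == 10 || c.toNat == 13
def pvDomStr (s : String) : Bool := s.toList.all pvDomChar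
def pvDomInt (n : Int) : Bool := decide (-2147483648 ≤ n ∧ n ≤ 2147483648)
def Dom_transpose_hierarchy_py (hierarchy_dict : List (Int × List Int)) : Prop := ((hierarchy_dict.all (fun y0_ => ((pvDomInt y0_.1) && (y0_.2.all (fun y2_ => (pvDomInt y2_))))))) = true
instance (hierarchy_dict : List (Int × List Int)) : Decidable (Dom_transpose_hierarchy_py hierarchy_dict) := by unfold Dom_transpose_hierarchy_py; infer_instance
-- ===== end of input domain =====

-- B replaces A's single-pass scatter (pushing k into every v's bucket) by a gather: dedup the
-- node stream, then for each node scan the items for incoming edges (simpler, not faster).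

-- ===== PORT A =====
-- Buckets are Python sets (PySem.Set Int); the final {k: frozenset(vs)} comprehension is the
-- identity on this representation, so the port returns the dict's items directly.
def transpose_hierarchy_py (hierarchy_dict : List (Int × List Int)) : List (Int × List Int) :=
  (hierarchy_dict.foldl (fun d kvs =>
      let d := if d.contains kvs.1 then d else d.insert kvs.1 []
      kvs.2.foldl (fun d v => d.insert v (PySem.Set.add (d.getD v []) kvs.1)) d)
    PySem.Dict.empty).items

-- ===== PORT B =====
def transpose_hierarchy_py_alt (hierarchy_dict : List (Int × List Int)) : List (Int × List Int) :=
  let nodes := PySem.List.dedup (hierarchy_dict.flatMap (fun kvs => kvs.1 :: kvs.2))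
  nodes.map (fun n =>
    (n, PySem.Set.ofList ((hierarchy_dict.filter (fun kvs => decide (n ∈ kvs.2))).map Prod.fst)))

-- ===== PRECONDITION & SPEC =====
def Spec_transpose_hierarchy_py (hierarchy_dict : List (Int × List Int)) (out : List (Int × List Int)) : Prop := out = transpose_hierarchy_py_alt hierarchy_dict
instance (hierarchy_dict : List (Int × List Int)) (out : List (Int × List Int)) : Decidable (Spec_transpose_hierarchy_py hierarchy_dict out) := by unfold Spec_transpose_hierarchy_py; infer_instance

-- ===== CLAIM (what is proved, stated in full; the proofs are below) =====
def Claim_equal_transpose_hierarchy_py : Prop := ∀ (hierarchy_dict : List (Int × List Int)), Dom_transpose_hierarchy_py hierarchy_dict → Spec_transpose_hierarchy_py hierarchy_dict (transpose_hierarchy_py hierarchy_dict)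

-- ===== LEMMAS AND PROOFS =====

-- incoming edges of n collected from the item list p (B's per-node gather, before dedup)
def pvIncoming (p : List (Int × List Int)) (n : Int) : List Int :=
  (p.filter (fun kvs => decide (n ∈ kvs.2))).map Prod.fst

theorem pvIncoming_of_not_mem_flat (p : List (Int × List Int)) (n : Int)
    (h : n ∉ p.flatMap (fun kvs => kvs.1 :: kvs.2)) : pvIncoming p n = [] := by
  unfold pvIncoming
  rw [List.filter_eq_nil_iff.mpr, List.map_nil]
  intro kvs hk
  simp only [decide_eq_true_eq]
  intro hmem
  exact h (List.mem_flatMap.mpr ⟨kvs, hk, List.mem_cons_of_mem _ hmem⟩)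

theorem pvIncoming_append_singleton (p : List (Int × List Int)) (k : Int) (vs : List Int) (n : Int) :
    pvIncoming (p ++ [(k, vs)]) n = pvIncoming p n ++ (if n ∈ vs then [k] else []) := by
  unfold pvIncoming
  rw [List.filter_append, List.map_append]
  congr 1
  by_cases h : n ∈ vs <;> simp [h]

-- one insert step of the inner loop, on a dict whose items are a tabulation over nodup keys
theorem pvStep_insert (N : List Int) (S : Int → List Int) (d : PySem.Dict Int (List Int))
    (hd : d.items = N.map (fun n => (n, S n))) (hN : N.Nodup)
    (hnil : ∀ n, n ∉ N → S n = []) (v k : Int) :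
    (d.insert v (PySem.Set.add (d.getD v []) k)).items
      = (PySem.Set.add N v).map (fun n => (n, if n = v then PySem.Set.add (S n) k else S n)) := by
  have hkeys : d.keys = N := by
    simp [PySem.Dict.keys, hd, List.map_map, Function.comp_def]
  by_cases hv : v ∈ N
  · have hcont : d.contains v = true := by
      rw [PySem.Dict.contains_eq_decide_mem_keys, hkeys]; simpa using hv
    have hget : d.getD v [] = S v := by
      apply PySem.Dict.getD_of_mem_items
      · rw [hd]; exact List.mem_map_of_mem hv
      · rw [hkeys]; exact hN
    rw [PySem.Dict.items_insert_of_contains _ _ hcont, hd,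
        PySem.Set.add_of_mem hv, List.map_map]
    apply List.map_congr_left
    intro n _
    by_cases hn : n = v <;> simp [hn, hget]
  · have hcont : d.contains v = false := by
      rw [PySem.Dict.contains_eq_decide_mem_keys, hkeys]; simpa using hv
    have hget : d.getD v [] = [] := PySem.Dict.getD_of_not_contains _ _ hcont
    rw [PySem.Dict.items_insert_of_not_contains _ _ hcont, hd,
        PySem.Set.add_of_not_mem hv, List.map_append]
    congr 1
    · apply List.map_congr_left
      intro n hn
      have : n ≠ v := fun h => hv (h ▸ hn)
      simp [this]
    · simp [hget, hnil v hv, PySem.Set.add]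

-- the inner loop over vs, generalized over the dict state
theorem pvInner (k : Int) (vs : List Int) (N : List Int) (S : Int → List Int)
    (d : PySem.Dict Int (List Int))
    (hd : d.items = N.map (fun n => (n, S n))) (hN : N.Nodup)
    (hnil : ∀ n, n ∉ N → S n = []) :
    (vs.foldl (fun d v => d.insert v (PySem.Set.add (d.getD v []) k)) d).items
      = (PySem.Set.update N vs).map (fun n => (n, if n ∈ vs then PySem.Set.add (S n) k else S n)) := by
  induction vs generalizing N S d with
  | nil => simpa [PySem.Set.update] using hd
  | cons v rest ih =>
    simp only [List.foldl_cons]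
    rw [PySem.Set.update_cons]
    have h1 := pvStep_insert N S d hd hN hnil v k
    rw [ih (PySem.Set.add N v) (fun n => if n = v then PySem.Set.add (S n) k else S n) _ h1
        (PySem.Set.nodup_add _ _ hN)
        (by
          intro n hn
          have hnN : n ∉ N := fun h => hn (by simp [PySem.Set.mem_add, h])
          have hnv : n ≠ v := fun h => hn (by simp [PySem.Set.mem_add, h])
          simp [hnv, hnil n hnN])]
    apply List.map_congr_left
    intro n _
    by_cases hnv : n = v
    · subst hnv
      by_cases hr : n ∈ rest <;> simp [hr]
    · by_cases hr : n ∈ rest <;> simp [hr, hnv]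

-- A's whole fold, characterized as B's gather (right-to-left induction on the item list)
theorem pvMain (p : List (Int × List Int)) :
    (p.foldl (fun d kvs =>
        let d := if d.contains kvs.1 then d else d.insert kvs.1 []
        kvs.2.foldl (fun d v => d.insert v (PySem.Set.add (d.getD v []) kvs.1)) d)
      PySem.Dict.empty).items
    = (PySem.Set.ofList (p.flatMap (fun kvs => kvs.1 :: kvs.2))).map
        (fun n => (n, PySem.Set.ofList (pvIncoming p n))) := by
  induction p using List.reverseRecOn with
  | nil => rfl
  | append_singleton p x ih =>
    obtain ⟨k, vs⟩ := x
    rw [List.foldl_append, List.foldl_cons, List.foldl_nil]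
    set N := PySem.Set.ofList (p.flatMap (fun kvs => kvs.1 :: kvs.2)) with hNdef
    have hN : N.Nodup := PySem.Set.nodup_ofList _
    set d := p.foldl (fun d kvs =>
        let d := if d.contains kvs.1 then d else d.insert kvs.1 []
        kvs.2.foldl (fun d v => d.insert v (PySem.Set.add (d.getD v []) kvs.1)) d)
      PySem.Dict.empty with hddef
    have hnil : ∀ n, n ∉ N → PySem.Set.ofList (pvIncoming p n) = [] := by
      intro n hn
      rw [pvIncoming_of_not_mem_flat p n (by simpa [hNdef, PySem.Set.mem_ofList] using hn)]
      rfl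
    have hkeys : d.keys = N := by
      simp [PySem.Dict.keys, ih, List.map_map, Function.comp_def]
    -- step 1: seed k's bucket if k is a fresh node
    have h1 : (if d.contains k then d else d.insert k []).items
        = (PySem.Set.add N k).map (fun n => (n, PySem.Set.ofList (pvIncoming p n))) := by
      by_cases hk : k ∈ N
      · have : d.contains k = true := by
          rw [PySem.Dict.contains_eq_decide_mem_keys, hkeys]; simpa using hk
        rw [if_pos this, PySem.Set.add_of_mem hk, ih]
      · have : d.contains k = false := by
          rw [PySem.Dict.contains_eq_decide_mem_keys, hkeys]; simpa using hk
        rw [if_neg (by simp [this]), PySem.Set.add_of_not_mem hk,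
            PySem.Dict.items_insert_of_not_contains _ _ this, ih, List.map_append]
        simp [hnil k hk]
    -- step 2: the inner loop over vs
    rw [pvInner k vs (PySem.Set.add N k) _ _ h1 (PySem.Set.nodup_add _ _ hN)
        (by
          intro n hn
          have hnN : n ∉ N := fun h => hn (by simp [PySem.Set.mem_add, h])
          exact hnil n hnN)]
    rw [List.flatMap_append, PySem.Set.ofList_append]
    simp only [List.flatMap_cons, List.flatMap_nil, List.append_nil, ← hNdef]
    rw [PySem.Set.update_cons]
    apply List.map_congr_left
    intro n _
    rw [pvIncoming_append_singleton]
    by_cases hv : n ∈ vs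
    · simp [hv, PySem.Set.ofList_append_singleton]
    · simp [hv]

-- ===== VERDICT (by name: the statement is the Claim_ definition above) =====
theorem transpose_hierarchy_py_spec : Claim_equal_transpose_hierarchy_py := by
  intro h _
  unfold Spec_transpose_hierarchy_py transpose_hierarchy_py transpose_hierarchy_py_alt
  rw [pvMain]
  simp [pvIncoming]
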